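-- pv_equiv track=rewrite | github.com/takyzdecina/engeto_projekt01 | main.py | all_counting
-- ===== SOURCE A (Python) =====
-- from typing import NamedTuple,Dict,List # importuje potřebné knihovny pro práci s daty
--
-- class letters_stat(NamedTuple): # vytvoří NamedTuple pro statistiku
-- 	words_sum: int
-- 	title_case: int
-- 	upper_case: int
-- 	lower_case: int
-- 	digit_case: int
-- 	sum_digits: int
--
-- def all_counting(buffer_words:List[str]) -> letters_stat: # počítá zastoupení jednotlivých slov
--     is_another_word = 0 # všechna slova
--     is_title_count = 0  # slova s velkým písmenem
--     is_upper_count = 0  # slova psaná velkými písmeny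
--     is_lower_count = 0  # slova psaná malými písmeny
--     is_digit_count = 0  # čísla v textu
--     is_digit_sum = 0    # součet čísel v textu
--
--     for word in buffer_words:   # pracuje se slovy
--         is_title_count += 1 if word.istitle() else 0    # počítá slova začínající velkým písmenem
--         is_upper_count += 1 if word.isupper() else 0    # počítá slova psaná velkými písmeny
--         is_lower_count += 1 if word.islower() else 0    # počítá slova psaná malými písmeny
--         is_another_word += 1                             # počítá celkový počet slov
--
--         if word.isdigit():  # pracuje s čísly
--             is_digit_count += 1                         # počítá čísla v textu
--             is_digit_sum += int(word)                      # počítá součet čísel v textu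
--         else: 0
--
--     return letters_stat(
-- 		words_sum = is_another_word,
-- 		title_case = is_title_count,
-- 		upper_case = is_upper_count,
-- 		lower_case = is_lower_count,
-- 		digit_case = is_digit_count,
-- 		sum_digits = is_digit_sum)
-- ===== SOURCE B (Python) =====
-- from typing import NamedTuple, Dict, List
--
-- class letters_stat(NamedTuple):
--     words_sum: int
--     title_case: int
--     upper_case: int
--     lower_case: int
--     digit_case: int
--     sum_digits: int
--
-- def all_counting(buffer_words: List[str]) -> letters_stat:
--     digits = [w for w in buffer_words if w.isdigit()]
--     return letters_stat(
--         words_sum=len(buffer_words),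
--         title_case=sum(1 for w in buffer_words if w.istitle()),
--         upper_case=sum(1 for w in buffer_words if w.isupper()),
--         lower_case=sum(1 for w in buffer_words if w.islower()),
--         digit_case=len(digits),
--         sum_digits=sum(int(w) for w in digits))
-- ===== Notes on version B (the rewrite author's own statement) =====
-- stated objective: idiomatic
-- what changed: Replaces the single six-counter accumulating loop with independent per-statistic passes (len, one generator sum per counter, a filtered digit list), assembled directly in the NamedTuple constructor.
import Mathlib
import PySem

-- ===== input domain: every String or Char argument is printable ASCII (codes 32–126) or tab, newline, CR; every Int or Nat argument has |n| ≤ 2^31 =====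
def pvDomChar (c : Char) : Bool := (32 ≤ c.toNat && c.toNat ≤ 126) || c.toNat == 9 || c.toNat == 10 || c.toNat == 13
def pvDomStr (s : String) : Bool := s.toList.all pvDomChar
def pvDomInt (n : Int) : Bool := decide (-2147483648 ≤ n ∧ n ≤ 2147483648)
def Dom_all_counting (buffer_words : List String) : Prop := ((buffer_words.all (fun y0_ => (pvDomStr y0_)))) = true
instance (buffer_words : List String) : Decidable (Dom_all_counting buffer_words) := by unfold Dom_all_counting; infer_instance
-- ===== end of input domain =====

-- B replaces A's single six-counter accumulating loop with one independent pass per statistic (idiomatic decomposition; same O(n) cost).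


-- ===== PORT A =====
-- shared helpers: Python str.istitle/isupper/islower, hand-ported (no PySem string primitive);
-- exact on ASCII, where the cased characters are exactly the letters
def pyIstitleAux : List Char → Bool → Bool → Bool
  | [], _, seen => seen
  | c :: cs, prevCased, seen =>
    if PySem.Chars.isupper c then
      if prevCased then false else pyIstitleAux cs true true
    else if PySem.Chars.islower c then
      if prevCased then pyIstitleAux cs true true else false
    else pyIstitleAux cs false seen

def pyIstitle (s : String) : Bool := pyIstitleAux s.toList false false

def pyIsupper (s : String) : Bool :=
  s.toList.any PySem.Chars.isupper && s.toList.all (fun c => !PySem.Chars.islower c)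

def pyIslower (s : String) : Bool :=
  s.toList.any PySem.Chars.islower && s.toList.all (fun c => !PySem.Chars.isupper c)

-- int(word) for a word known to be all digits (exact there: ofStr? is some)
def pyIntOf (s : String) : Int := (PySem.Int.ofStr? s).getD 0

-- one iteration of A's loop over its six-counter state
def stepA (st : Int × Int × Int × Int × Int × Int) (word : String) :
    Int × Int × Int × Int × Int × Int :=
  let (aw, t, u, l, dc, ds) := st
  let t := t + (if pyIstitle word then 1 else 0)
  let u := u + (if pyIsupper word then 1 else 0)
  let l := l + (if pyIslower word then 1 else 0)
  let aw := aw + 1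
  if PySem.Str.strIsdigit word then (aw, t, u, l, dc + 1, ds + pyIntOf word)
  else (aw, t, u, l, dc, ds)

def all_counting (buffer_words : List String) : Int × Int × Int × Int × Int × Int :=
  buffer_words.foldl stepA (0, 0, 0, 0, 0, 0)

-- ===== PORT B =====
def all_counting_alt (buffer_words : List String) : Int × Int × Int × Int × Int × Int :=
  let digits := buffer_words.filter PySem.Str.strIsdigit
  ((buffer_words.length : Int),
   (buffer_words.countP pyIstitle : Int),
   (buffer_words.countP pyIsupper : Int),
   (buffer_words.countP pyIslower : Int),
   (digits.length : Int),
   (digits.map pyIntOf).sum)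

-- ===== PRECONDITION & SPEC =====
def Spec_all_counting (buffer_words : List String) (out : Int × Int × Int × Int × Int × Int) : Prop := out = all_counting_alt buffer_words
instance (buffer_words : List String) (out : Int × Int × Int × Int × Int × Int) : Decidable (Spec_all_counting buffer_words out) := by unfold Spec_all_counting; infer_instance

-- ===== CLAIM (what is proved, stated in full; the proofs are below) =====
def Claim_equal_all_counting : Prop := ∀ (buffer_words : List String), Dom_all_counting buffer_words → Spec_all_counting buffer_words (all_counting buffer_words)

-- ===== LEMMAS AND PROOFS =====
theorem foldA_spec (bw : List String) (a t u l dc ds : Int) :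
    bw.foldl stepA (a, t, u, l, dc, ds) =
      (a + bw.length,
       t + bw.countP pyIstitle,
       u + bw.countP pyIsupper,
       l + bw.countP pyIslower,
       dc + (bw.filter PySem.Str.strIsdigit).length,
       ds + ((bw.filter PySem.Str.strIsdigit).map pyIntOf).sum) := by
  induction bw generalizing a t u l dc ds with
  | nil => simp
  | cons w ws ih =>
    simp only [List.foldl_cons, stepA, List.countP_cons, List.filter_cons]
    split_ifs <;> simp_all [Prod.ext_iff] <;> omega

-- ===== VERDICT (by name: the statement is the Claim_ definition above) =====
theorem all_counting_spec : Claim_equal_all_counting := by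
  intro bw _
  unfold Spec_all_counting all_counting all_counting_alt
  rw [foldA_spec]
  simp
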